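-- pv_equiv track=rewrite | github.com/sagamc03-jpg/Organizador | analizador_oraciones/orden.py | extraer_determinantes
-- ===== SOURCE A (Python) =====
-- def extraer_determinantes(resultados, indices_usados):
--     """
--     Extrae y clasifica determinantes en definidos e indefinidos.
--     """
--     # Identificar determinantes
--     dets_indices = []
--     for i, palabra in enumerate(resultados):
--         if palabra["pos"] == "DET" and i not in indices_usados:
--             dets_indices.append((i, palabra))
--
--     # Separar DET definidos e indefinidos
--     dets_definidos = []
--     dets_indefinidos = []
--
--     for i, det in dets_indices:
--         genero = det.get("gen")
--         if genero in ["Masc", "Fem"]: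
--             dets_definidos.append((i, det))
--         else:
--             dets_indefinidos.append((i, det))
--
--     # Ordenar: definidos primero
--     dets_ordenados = dets_definidos + dets_indefinidos
--     total_dets = len(dets_indices)
--
--     return dets_ordenados, total_dets
-- ===== SOURCE B (Python) =====
-- def extraer_determinantes(resultados, indices_usados):
--     """
--     Extrae y clasifica determinantes en definidos e indefinidos.
--     """
--     dets = [(i, p) for i, p in enumerate(resultados)
--             if p["pos"] == "DET" and i not in indices_usados]
--     ordenados = sorted(dets, key=lambda d: 0 if d[1].get("gen") in ("Masc", "Fem") else 1)
--     return ordenados, len(dets)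
-- ===== Notes on version B (the rewrite author's own statement) =====
-- stated objective: idiomatic
-- what changed: Replaces the explicit two-bucket partition-and-concatenate loops with one comprehension collecting qualifying (i, palabra) pairs followed by a single stable sort on a 0/1 key (definidos before indefinidos, original order kept within each group).
import Mathlib
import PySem

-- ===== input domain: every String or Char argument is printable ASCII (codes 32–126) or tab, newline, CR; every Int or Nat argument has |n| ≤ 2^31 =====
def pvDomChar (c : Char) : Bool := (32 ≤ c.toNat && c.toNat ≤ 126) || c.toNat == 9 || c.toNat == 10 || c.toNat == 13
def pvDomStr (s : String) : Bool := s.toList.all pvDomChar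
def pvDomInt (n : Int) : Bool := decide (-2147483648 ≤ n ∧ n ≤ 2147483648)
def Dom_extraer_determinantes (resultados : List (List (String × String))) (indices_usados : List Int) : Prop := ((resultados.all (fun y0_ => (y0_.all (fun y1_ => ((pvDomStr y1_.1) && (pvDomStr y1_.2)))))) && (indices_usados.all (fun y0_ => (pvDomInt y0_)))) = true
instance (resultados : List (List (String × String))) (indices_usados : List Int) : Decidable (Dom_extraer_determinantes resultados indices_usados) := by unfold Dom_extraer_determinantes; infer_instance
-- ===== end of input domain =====

-- B replaces A's two-bucket partition loops by collecting the qualifying pairs once and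
-- ordering them with a single stable sort on a 0/1 key (idiomatic; same observable result).

-- ===== PORT A =====
-- condition of A's first loop: palabra["pos"] == "DET" and i not in indices_usados
def pvEsDet (indices_usados : List Int) (ip : Int × List (String × String)) : Bool :=
  ((PySem.Dict.mk ip.2).get? "pos" == some "DET") && !(indices_usados.contains ip.1)

-- condition of A's second loop: det.get("gen") in ["Masc", "Fem"]
def pvEsDefinido (ip : Int × List (String × String)) : Bool :=
  (PySem.Dict.mk ip.2).get? "gen" == some "Masc" || (PySem.Dict.mk ip.2).get? "gen" == some "Fem"

def extraer_determinantes (resultados : List (List (String × String))) (indices_usados : List Int) : (List (Int × (List (String × String)))) × Int :=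
  -- first loop: dets_indices
  let dets_indices : List (Int × List (String × String)) :=
    (PySem.List.enumerate resultados).foldl
      (fun acc ip => if pvEsDet indices_usados ip then acc ++ [ip] else acc) []
  -- second loop: two buckets
  let buckets : List (Int × List (String × String)) × List (Int × List (String × String)) :=
    dets_indices.foldl
      (fun acc ip => if pvEsDefinido ip then (acc.1 ++ [ip], acc.2) else (acc.1, acc.2 ++ [ip]))
      ([], [])
  (buckets.1 ++ buckets.2, PySem.List.len dets_indices)

-- ===== PORT B =====
-- sort key of Source B: 0 if d[1].get("gen") in ("Masc","Fem") else 1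
def pvDetKey (ip : Int × List (String × String)) : Int :=
  if pvEsDefinido ip then 0 else 1

def extraer_determinantes_alt (resultados : List (List (String × String))) (indices_usados : List Int) : (List (Int × (List (String × String)))) × Int :=
  let dets : List (Int × List (String × String)) :=
    (PySem.List.enumerate resultados).filter (fun ip => pvEsDet indices_usados ip)
  (PySem.List.sorted dets pvDetKey, PySem.List.len dets)

-- ===== PRECONDITION & SPEC =====
-- Pre_ excludes exactly the inputs on which Python A raises KeyError: some word dict lacks the key "pos".
def Pre_extraer_determinantes (resultados : List (List (String × String))) (indices_usados : List Int) : Prop :=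
  ∀ p ∈ resultados, ((PySem.Dict.mk p).get? "pos").isSome = true
instance (resultados : List (List (String × String))) (indices_usados : List Int) : Decidable (Pre_extraer_determinantes resultados indices_usados) := by unfold Pre_extraer_determinantes; infer_instance
def pvWitness_extraer_determinantes : (List (List (String × String))) × List Int :=
  ([[("pos", "DET"), ("gen", "Masc")], [("pos", "NOUN")], [("pos", "DET")]], [1])

def Spec_extraer_determinantes (resultados : List (List (String × String))) (indices_usados : List Int) (out : (List (Int × (List (String × String)))) × Int) : Prop := out = extraer_determinantes_alt resultados indices_usados
instance (resultados : List (List (String × String))) (indices_usados : List Int) (out : (List (Int × (List (String × String)))) × Int) : Decidable (Spec_extraer_determinantes resultados indices_usados out) := by unfold Spec_extraer_determinantes; infer_instance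

-- ===== CLAIM (what is proved, stated in full; the proofs are below) =====
def Claim_equal_extraer_determinantes : Prop := ∀ (resultados : List (List (String × String))) (indices_usados : List Int), Dom_extraer_determinantes resultados indices_usados → Pre_extraer_determinantes resultados indices_usados → Spec_extraer_determinantes resultados indices_usados (extraer_determinantes resultados indices_usados)

-- ===== LEMMAS AND PROOFS =====

-- insertBy skips a prefix it never goes before
lemma insertBy_append_of_not_before {α : Type} (before : α → α → Bool) (x : α)
    (A B : List α) (h : ∀ a ∈ A, before x a = false) :
    PySem.List.insertBy before x (A ++ B) = A ++ PySem.List.insertBy before x B := by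
  induction A with
  | nil => simp
  | cons a A ih =>
    have ha : before x a = false := h a (by simp)
    simp [PySem.List.insertBy, ha, ih (fun y hy => h y (by simp [hy]))]

-- the stable 0/1-key insertion-sort invariant: accumulator stays of shape (key-0 block ++ key-1 block)
lemma foldl_insertBy_two_key {α : Type} (q : α → Bool) (xs : List α) :
    ∀ A B : List α, (∀ a ∈ A, q a = true) → (∀ b ∈ B, q b = false) →
      xs.foldl (fun acc x =>
          PySem.List.insertBy (fun a b =>
            decide ((if q a then (0 : Int) else 1) < (if q b then (0 : Int) else 1))) x acc) (A ++ B)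
        = (A ++ xs.filter q) ++ (B ++ xs.filter (fun x => !q x)) := by
  induction xs with
  | nil => intro A B _ _; simp
  | cons x xs ih =>
    intro A B hA hB
    by_cases hx : q x = true
    · have hstep : PySem.List.insertBy (fun a b =>
          decide ((if q a then (0 : Int) else 1) < (if q b then (0 : Int) else 1))) x (A ++ B)
          = (A ++ [x]) ++ B := by
        rw [insertBy_append_of_not_before _ _ _ _ (fun a ha => by simp [hx, hA a ha])]
        cases B with
        | nil => simp [PySem.List.insertBy]
        | cons b B' =>
          have hb : q b = false := hB b (by simp)
          simp [PySem.List.insertBy, hx, hb]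
      simp only [List.foldl_cons, hstep]
      have hA' : ∀ a ∈ A ++ [x], q a = true := by
        intro a ha
        rcases List.mem_append.1 ha with h | h
        · exact hA a h
        · simp_all
      rw [ih (A ++ [x]) B hA' hB]
      simp [hx]
    · have hx' : q x = false := by simp_all
      have hstep : PySem.List.insertBy (fun a b =>
          decide ((if q a then (0 : Int) else 1) < (if q b then (0 : Int) else 1))) x (A ++ B)
          = A ++ (B ++ [x]) := by
        rw [← List.append_assoc]
        apply PySem.List.insertBy_of_forall_not_before
        intro y hy
        rcases List.mem_append.1 hy with h | h
        · simp [hx', hA y h]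
        · simp [hx', hB y h]
      simp only [List.foldl_cons, hstep]
      have hB' : ∀ b ∈ B ++ [x], q b = false := by
        intro b hb
        rcases List.mem_append.1 hb with h | h
        · exact hB b h
        · simp_all
      rw [ih A (B ++ [x]) hA hB']
      simp [hx']

-- a stable sort on a 0/1 key is filter-true ++ filter-false
lemma sorted_two_key {α : Type} (q : α → Bool) (xs : List α) :
    PySem.List.sorted xs (fun x => if q x then (0 : Int) else 1)
      = xs.filter q ++ xs.filter (fun x => !q x) := by
  rw [PySem.List.sorted_eq_foldl_insertBy]
  simpa using foldl_insertBy_two_key q xs [] [] (by simp) (by simp)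

-- A's second loop is the two filters
lemma foldl_buckets (xs : List (Int × List (String × String)))
    (A B : List (Int × List (String × String))) :
    xs.foldl (fun acc ip => if pvEsDefinido ip then (acc.1 ++ [ip], acc.2) else (acc.1, acc.2 ++ [ip])) (A, B)
      = (A ++ xs.filter pvEsDefinido, B ++ xs.filter (fun ip => !pvEsDefinido ip)) := by
  induction xs generalizing A B with
  | nil => simp
  | cons x xs ih =>
    by_cases hx : pvEsDefinido x = true
    · simp [hx, ih]
    · have hx' : pvEsDefinido x = false := by simp_all
      simp [hx', ih]

-- ===== VERDICT (by name: the statement is the Claim_ definition above) =====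
theorem extraer_determinantes_spec : Claim_equal_extraer_determinantes := by
  intro resultados indices_usados _ _
  unfold Spec_extraer_determinantes extraer_determinantes extraer_determinantes_alt
  have h1 : (PySem.List.enumerate resultados).foldl
      (fun acc ip => if pvEsDet indices_usados ip then acc ++ [ip] else acc) []
      = (PySem.List.enumerate resultados).filter (fun ip => pvEsDet indices_usados ip) := by
    simpa using PySem.List.foldl_append_if (fun ip => pvEsDet indices_usados ip) id
      (PySem.List.enumerate resultados) []
  simp only [h1, foldl_buckets, List.nil_append]
  have h2 : PySem.List.sorted
      ((PySem.List.enumerate resultados).filter (fun ip => pvEsDet indices_usados ip)) pvDetKey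
      = ((PySem.List.enumerate resultados).filter (fun ip => pvEsDet indices_usados ip)).filter pvEsDefinido
        ++ ((PySem.List.enumerate resultados).filter (fun ip => pvEsDet indices_usados ip)).filter (fun ip => !pvEsDefinido ip) := by
    have := sorted_two_key pvEsDefinido
      ((PySem.List.enumerate resultados).filter (fun ip => pvEsDet indices_usados ip))
    simpa [pvDetKey] using this
  rw [h2]
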